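-- pv_equiv track=rewrite | github.com/DavidDeLaVegaUNAM/Programas_De_Practica | Análisis de Algoritmos /Algoritmo 3/Ordenamiento/src/Ordenamiento.py | ordenar_arbol
-- ===== SOURCE A (Python) =====
-- class NodoArbol:
--     """
--     Clase para representar un nodo en un árbol binario de búsqueda.
--     """
--     def __init__(self, clave):
--         """
--         Inicializa un nuevo nodo con la clave proporcionada.
--         """
--         self.izquierda = None
--         self.derecha = None
--         self.valor = clave
--
-- def insertar(raiz, clave, pasos):
--     """
--     Inserta un nuevo nodo con la clave dada en un árbol binario de búsqueda y
--     guarda los pasos intermedios.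
--
--     Args:
--         raiz: Nodo raíz del árbol.
--         clave: Clave del nuevo nodo a insertar.
--         pasos: Lista para almacenar los pasos intermedios.
--
--     Returns:
--         El nodo raíz actualizado después de insertar el nuevo nodo.
--     """
--     if raiz is None:
--         pasos.append(f"Insertar {clave} como raíz.")
--         return NodoArbol(clave)
--     else:
--         if raiz.valor < clave:
--             pasos.append(f"Insertar {clave} a la derecha de {raiz.valor}.")
--             raiz.derecha = insertar(raiz.derecha, clave, pasos)
--         else:
--             pasos.append(f"Insertar {clave} a la izquierda de {raiz.valor}.")
--             raiz.izquierda = insertar(raiz.izquierda, clave, pasos)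
--     return raiz
--
-- def recorrido_en_orden(raiz, lista_ordenada, pasos):
--     """
--     Realiza un recorrido en orden del árbol binario de búsqueda y guarda los
--     valores en una lista, en orden ascendente.
--
--     Args:
--         raiz: Nodo raíz del árbol.
--         lista_ordenada: Lista para almacenar los valores en orden.
--         pasos: Lista para almacenar los pasos intermedios.
--
--     Returns:
--         None
--     """
--     if raiz:
--         recorrido_en_orden(raiz.izquierda, lista_ordenada, pasos)
--         lista_ordenada.append(raiz.valor)
--         pasos.append(f"Visitar nodo {raiz.valor}.")
--         recorrido_en_orden(raiz.derecha, lista_ordenada, pasos)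
--
-- def ordenar_arbol(arreglo):
--     """
--     Ordena un arreglo utilizando el algoritmo de Tree Sort, que consiste en
--     insertar los elementos en un árbol binario de búsqueda y luego realizar un
--     recorrido en orden del árbol.
--
--     Args:
--         arreglo: Arreglo que se desea ordenar.
--
--     Returns:
--         Lista con el arreglo ordenado y los pasos intermedios del algoritmo.
--     """
--     raiz = None
--     pasos = []
--     for clave in arreglo:
--         raiz = insertar(raiz, clave, pasos)
--     lista_ordenada = []
--     recorrido_en_orden(raiz, lista_ordenada, pasos)
--     return lista_ordenada, pasos
-- ===== SOURCE B (Python) =====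
-- def ordenar_arbol(arreglo):
--     # Iterative tree sort: insertion by a descent loop on list-nodes, traversal
--     # with an explicit stack (no recursion); same sorted list and step log.
--     pasos = []
--     raiz = None
--     for clave in arreglo:
--         if raiz is None:
--             pasos.append(f"Insertar {clave} como raíz.")
--             raiz = [None, clave, None]  # [izquierda, valor, derecha]
--             continue
--         nodo = raiz
--         while True:
--             if nodo[1] < clave:
--                 pasos.append(f"Insertar {clave} a la derecha de {nodo[1]}.")
--                 if nodo[2] is None:
--                     pasos.append(f"Insertar {clave} como raíz.")
--                     nodo[2] = [None, clave, None]
--                     break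
--                 nodo = nodo[2]
--             else:
--                 pasos.append(f"Insertar {clave} a la izquierda de {nodo[1]}.")
--                 if nodo[0] is None:
--                     pasos.append(f"Insertar {clave} como raíz.")
--                     nodo[0] = [None, clave, None]
--                     break
--                 nodo = nodo[0]
--     lista_ordenada = []
--     stack = []
--     nodo = raiz
--     while stack or nodo is not None:
--         while nodo is not None:
--             stack.append(nodo)
--             nodo = nodo[0]
--         nodo = stack.pop()
--         lista_ordenada.append(nodo[1])
--         pasos.append(f"Visitar nodo {nodo[1]}.")
--         nodo = nodo[2]
--     return lista_ordenada, pasos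
-- ===== Notes on version B (the rewrite author's own statement) =====
-- stated objective: alternative
-- what changed: Recursive BST insertion is replaced by an iterative descent loop that attaches the new node at the empty slot (rebuild along the recorded path in the Lean port), and the recursive in-order traversal is replaced by an explicit-stack loop; same sorted list and identical step log.
import Mathlib
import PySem

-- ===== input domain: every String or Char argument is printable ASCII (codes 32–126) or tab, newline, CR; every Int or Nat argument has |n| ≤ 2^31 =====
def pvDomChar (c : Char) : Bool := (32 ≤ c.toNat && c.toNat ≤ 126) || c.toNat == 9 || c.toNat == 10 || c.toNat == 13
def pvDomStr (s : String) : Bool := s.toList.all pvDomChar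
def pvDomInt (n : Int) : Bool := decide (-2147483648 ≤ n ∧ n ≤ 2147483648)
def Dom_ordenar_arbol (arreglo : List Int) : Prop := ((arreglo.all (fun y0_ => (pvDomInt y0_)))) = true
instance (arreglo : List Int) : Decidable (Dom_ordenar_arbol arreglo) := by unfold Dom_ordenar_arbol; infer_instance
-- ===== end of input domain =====

-- B replaces A's recursive BST insertion and recursive in-order traversal by an
-- iterative descent (zipper rebuild) and an explicit-stack traversal (objective: alternative).

-- ===== PORT A =====

-- A binary search tree node; `leaf` plays the role of Python's None.
inductive Arbol : Type
  | leaf : Arbol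
  | node : Arbol → Int → Arbol → Arbol
deriving DecidableEq, Repr

def msg_raiz (c : Int) : String := "Insertar " ++ PySem.Int.toStr c ++ " como raíz."
def msg_der (c v : Int) : String := "Insertar " ++ PySem.Int.toStr c ++ " a la derecha de " ++ PySem.Int.toStr v ++ "."
def msg_izq (c v : Int) : String := "Insertar " ++ PySem.Int.toStr c ++ " a la izquierda de " ++ PySem.Int.toStr v ++ "."
def msg_vis (v : Int) : String := "Visitar nodo " ++ PySem.Int.toStr v ++ "."

-- `insertar`: A's recursive insertion; `pasos` is threaded as state (Python mutates it).
def insertarA : Arbol → Int → List String → Arbol × List String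
  | .leaf, c, p => (.node .leaf c .leaf, p ++ [msg_raiz c])
  | .node l v r, c, p =>
    if v < c then
      let res := insertarA r c (p ++ [msg_der c v])
      (.node l v res.1, res.2)
    else
      let res := insertarA l c (p ++ [msg_izq c v])
      (.node res.1 v r, res.2)

-- `recorrido_en_orden`: A's recursive in-order traversal, threading both lists.
def recorridoA : Arbol → List Int → List String → List Int × List String
  | .leaf, li, p => (li, p)
  | .node l v r, li, p =>
    let res := recorridoA l li p
    recorridoA r (res.1 ++ [v]) (res.2 ++ [msg_vis v])

def ordenar_arbol (arreglo : List Int) : List Int × List String :=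
  let st := arreglo.foldl (fun (st : Arbol × List String) c => insertarA st.1 c st.2) (.leaf, [])
  recorridoA st.1 [] st.2

-- ===== PORT B =====

-- B's descent loop records the path it walks; a frame is the part of the node
-- not descended into (`.R v l`: we went right below value v, keeping left subtree l).
inductive Marco : Type
  | L : Int → Arbol → Marco
  | R : Int → Arbol → Marco
deriving DecidableEq, Repr

def rearma (t : Arbol) (f : Marco) : Arbol :=
  match f with
  | .L v r => .node t v r
  | .R v l => .node l v t

def Arbol.size : Arbol → Nat
  | .leaf => 0
  | .node l _ r => l.size + r.size + 1

-- the `while True` descent of Source B: walk down, log, stop at an empty child slot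
def desciendeB : Arbol → Int → List Marco → List String → List Marco × List String
  | .leaf, _, path, p => (path, p)  -- unreachable: called on non-leaf nodes only
  | .node l v r, c, path, p =>
    if v < c then
      if r = .leaf then (Marco.R v l :: path, p ++ [msg_der c v, msg_raiz c])
      else desciendeB r c (Marco.R v l :: path) (p ++ [msg_der c v])
    else
      if l = .leaf then (Marco.L v r :: path, p ++ [msg_izq c v, msg_raiz c])
      else desciendeB l c (Marco.L v r :: path) (p ++ [msg_izq c v])

-- one insertion in Source B: empty-root case, else descend and rebuild along the path
def insertaB (t : Arbol) (c : Int) (p : List String) : Arbol × List String :=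
  match t with
  | .leaf => (.node .leaf c .leaf, p ++ [msg_raiz c])
  | .node _ _ _ =>
    let res := desciendeB t c [] p
    (res.1.foldl rearma (.node .leaf c .leaf), res.2)

-- Source B's explicit-stack traversal: push left spine, pop, visit, go right
def recorreB (cur : Arbol) (st : List (Int × Arbol)) (li : List Int) (p : List String) :
    List Int × List String :=
  match cur, st with
  | .node l v r, st => recorreB l ((v, r) :: st) li p
  | .leaf, (v, r) :: st => recorreB r st (li ++ [v]) (p ++ [msg_vis v])
  | .leaf, [] => (li, p)
termination_by 2 * cur.size + (st.map (fun x => 2 * x.2.size + 1)).sum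
decreasing_by
  all_goals (simp [Arbol.size]; try omega)

def ordenar_arbol_alt (arreglo : List Int) : List Int × List String :=
  let st := arreglo.foldl (fun (st : Arbol × List String) c => insertaB st.1 c st.2) (.leaf, [])
  recorreB st.1 [] [] st.2

-- ===== PRECONDITION & SPEC =====
def Spec_ordenar_arbol (arreglo : List Int) (out : List Int × List String) : Prop := out = ordenar_arbol_alt arreglo
instance (arreglo : List Int) (out : List Int × List String) : Decidable (Spec_ordenar_arbol arreglo out) := by unfold Spec_ordenar_arbol; infer_instance

-- ===== CLAIM (what is proved, stated in full; the proofs are below) =====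
def Claim_equal_ordenar_arbol : Prop := ∀ (arreglo : List Int), Dom_ordenar_arbol arreglo → Spec_ordenar_arbol arreglo (ordenar_arbol arreglo)

-- ===== LEMMAS AND PROOFS =====

-- B's descent + rebuild computes exactly A's recursive insertion (path-generalised).
theorem desciende_eq (c : Int) : ∀ (t : Arbol) (path : List Marco) (p : List String),
    t ≠ .leaf →
    ((desciendeB t c path p).1.foldl rearma (.node .leaf c .leaf),
      (desciendeB t c path p).2)
    = (path.foldl rearma (insertarA t c p).1, (insertarA t c p).2) := by
  intro t
  induction t with
  | leaf => intro _ _ h; exact absurd rfl h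
  | node l v r ihl ihr =>
    intro path p _
    by_cases hv : v < c
    · by_cases hr : r = Arbol.leaf
      · subst hr; simp [desciendeB, insertarA, hv, rearma]
      · have := ihr (Marco.R v l :: path) (p ++ [msg_der c v]) hr
        simp only [desciendeB, hv, hr, if_true, if_false, insertarA] at this ⊢
        simpa [rearma] using this
    · by_cases hl : l = Arbol.leaf
      · subst hl; simp [desciendeB, insertarA, hv, rearma]
      · have := ihl (Marco.L v r :: path) (p ++ [msg_izq c v]) hl
        simp only [desciendeB, hv, hl, if_true, if_false, insertarA] at this ⊢
        simpa [rearma] using this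

theorem inserta_eq (t : Arbol) (c : Int) (p : List String) : insertaB t c p = insertarA t c p := by
  cases t with
  | leaf => rfl
  | node l v r =>
    have h := desciende_eq c (.node l v r) [] p (by simp)
    simp only [List.foldl_nil] at h
    simp only [insertaB]
    exact h.trans (Prod.mk.eta)

theorem recorreB_node (l : Arbol) (v : Int) (r : Arbol) (st : List (Int × Arbol))
    (li : List Int) (p : List String) :
    recorreB (.node l v r) st li p = recorreB l ((v, r) :: st) li p := by
  rw [recorreB]

theorem recorreB_pop (v : Int) (r : Arbol) (st : List (Int × Arbol))
    (li : List Int) (p : List String) :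
    recorreB .leaf ((v, r) :: st) li p = recorreB r st (li ++ [v]) (p ++ [msg_vis v]) := by
  rw [recorreB]

theorem recorreB_nil (li : List Int) (p : List String) : recorreB .leaf [] li p = (li, p) := by
  rw [recorreB]

-- The stack traversal equals the recursive in-order traversal followed by the
-- remaining stack processing.
theorem recorre_split : ∀ (t : Arbol) (st : List (Int × Arbol)) (li : List Int) (p : List String),
    recorreB t st li p = recorreB .leaf st (recorridoA t li p).1 (recorridoA t li p).2 := by
  intro t
  induction t with
  | leaf => intro st li p; simp [recorridoA]
  | node l v r ihl ihr =>
    intro st li p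
    rw [recorreB_node, ihl, recorreB_pop, ihr]
    simp [recorridoA]

theorem recorre_eq (t : Arbol) (li : List Int) (p : List String) :
    recorreB t [] li p = recorridoA t li p := by
  rw [recorre_split, recorreB_nil]

-- ===== VERDICT (by name: the statement is the Claim_ definition above) =====
theorem ordenar_arbol_spec : Claim_equal_ordenar_arbol := by
  intro arreglo _
  unfold Spec_ordenar_arbol ordenar_arbol ordenar_arbol_alt
  have hf : (fun (st : Arbol × List String) c => insertaB st.1 c st.2)
      = (fun (st : Arbol × List String) c => insertarA st.1 c st.2) := by
    funext st c; exact inserta_eq st.1 c st.2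
  rw [hf, recorre_eq]
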